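-- pv_equiv track=rewrite | github.com/artonson/def | sharpf/utils/abc_utils/abc/feature_utils.py | get_adjacent_features_by_bfs_with_depth1
-- ===== SOURCE A (Python) =====
-- from collections import defaultdict
-- from copy import deepcopy
--
-- def get_adjacent_features_by_bfs_with_depth1(
--         surface_idx,
--         adjacent_sharp_features,
--         adjacent_surfaces,
--         always_check_adjacent_surfaces=False
-- ):
--     """If adjacent sharp curves exist, return one of them.
--     If not, return ones adjacent to adjacent surfaces. """
--
--     adjacent_sharp_indexes = deepcopy(adjacent_sharp_features[surface_idx])
--     if always_check_adjacent_surfaces or len(adjacent_sharp_indexes) == 0: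
--
--         for adjacent_surface_idx in adjacent_surfaces[surface_idx]:
--             adjacent_surface_adjacent_sharp_features = \
--                 {adjacent_surface_idx: adjacent_sharp_features[adjacent_surface_idx]}
--
--             adjacent_surface_adjacent_sharp_indexes = \
--                 get_adjacent_features_by_bfs_with_depth1(
--                     adjacent_surface_idx, adjacent_surface_adjacent_sharp_features,
--                     defaultdict(list))
--
--             adjacent_sharp_indexes.extend(adjacent_surface_adjacent_sharp_indexes)
--
--     return adjacent_sharp_indexes
-- ===== SOURCE B (Python) =====
-- def get_adjacent_features_by_bfs_with_depth1(
--         surface_idx,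
--         adjacent_sharp_features,
--         adjacent_surfaces,
--         always_check_adjacent_surfaces=False
-- ):
--     """Flat, non-recursive version: own sharp features, else/plus those of
--     the adjacent surfaces, gathered in one comprehension."""
--     own = adjacent_sharp_features[surface_idx]
--     if own and not always_check_adjacent_surfaces:
--         return list(own)
--     return list(own) + [idx
--                         for adj in adjacent_surfaces[surface_idx]
--                         for idx in adjacent_sharp_features[adj]]
-- ===== Notes on version B (the rewrite author's own statement) =====
-- stated objective: simpler
-- what changed: B removes the recursion entirely (A's depth-1 recursive call is vacuous because it receives an empty defaultdict of surfaces): an early return of the surface's own sharp features, else one flat comprehension appending the features of each adjacent surface.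
import Mathlib
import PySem

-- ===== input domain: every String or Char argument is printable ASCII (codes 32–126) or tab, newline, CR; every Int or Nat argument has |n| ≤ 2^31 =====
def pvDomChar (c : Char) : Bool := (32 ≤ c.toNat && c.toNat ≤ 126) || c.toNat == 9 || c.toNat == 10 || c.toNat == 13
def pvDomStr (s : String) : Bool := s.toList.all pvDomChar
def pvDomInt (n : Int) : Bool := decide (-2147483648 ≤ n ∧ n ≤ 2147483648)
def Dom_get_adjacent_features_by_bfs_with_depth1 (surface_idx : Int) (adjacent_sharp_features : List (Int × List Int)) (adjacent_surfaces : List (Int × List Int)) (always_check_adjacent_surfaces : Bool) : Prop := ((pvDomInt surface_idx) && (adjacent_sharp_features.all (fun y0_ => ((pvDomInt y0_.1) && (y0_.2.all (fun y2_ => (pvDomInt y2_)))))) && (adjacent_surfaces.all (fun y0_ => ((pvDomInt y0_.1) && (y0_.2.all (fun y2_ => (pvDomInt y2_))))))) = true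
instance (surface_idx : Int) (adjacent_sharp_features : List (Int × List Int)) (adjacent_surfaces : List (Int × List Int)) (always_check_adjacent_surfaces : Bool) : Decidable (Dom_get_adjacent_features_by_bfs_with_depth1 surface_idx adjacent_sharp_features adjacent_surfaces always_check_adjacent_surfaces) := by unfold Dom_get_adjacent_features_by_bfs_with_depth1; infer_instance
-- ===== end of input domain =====

-- B replaces A's vacuous depth-1 recursion by a single early return plus one flat
-- comprehension over the adjacent surfaces (objective: simpler).

-- ===== PORT A =====
-- first-match association lookup = Python dict access d[k] (some value, or none = KeyError)
def gafLookup? (d : List (Int × List Int)) (k : Int) : Option (List Int) :=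
  (d.find? (fun p => p.1 == k)).map (·.2)

-- The recursive call inside A's loop: it receives the singleton dict
-- {adj: features[adj]} and a fresh 'defaultdict(list)' as adjacent_surfaces, with
-- always_check_adjacent_surfaces left at False.  The defaultdict lookup yields [],
-- so the for-loop iterates over [] and its body (the further recursive call) never
-- runs; that loop is ported as a fold over [] whose body is therefore vacuous.
def gafInner (surface_idx : Int) (adjacent_sharp_features : List (Int × List Int)) : List Int :=
  let adjacent_sharp_indexes := (gafLookup? adjacent_sharp_features surface_idx).getD []
  if adjacent_sharp_indexes.length == 0 then
    ([] : List Int).foldl (fun acc _ => acc) adjacent_sharp_indexes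
  else adjacent_sharp_indexes

-- '.getD []' is reached only when the lookup succeeds: Pre_ excludes the KeyError inputs.
def get_adjacent_features_by_bfs_with_depth1 (surface_idx : Int) (adjacent_sharp_features : List (Int × List Int)) (adjacent_surfaces : List (Int × List Int)) (always_check_adjacent_surfaces : Bool) : List Int :=
  let adjacent_sharp_indexes := (gafLookup? adjacent_sharp_features surface_idx).getD []
  if always_check_adjacent_surfaces || adjacent_sharp_indexes.length == 0 then
    ((gafLookup? adjacent_surfaces surface_idx).getD []).foldl
      (fun acc adjacent_surface_idx =>
        let adjacent_surface_adjacent_sharp_features :=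
          [(adjacent_surface_idx, (gafLookup? adjacent_sharp_features adjacent_surface_idx).getD [])]
        acc ++ gafInner adjacent_surface_idx adjacent_surface_adjacent_sharp_features)
      adjacent_sharp_indexes
  else adjacent_sharp_indexes

-- ===== PORT B =====
def get_adjacent_features_by_bfs_with_depth1_alt (surface_idx : Int) (adjacent_sharp_features : List (Int × List Int)) (adjacent_surfaces : List (Int × List Int)) (always_check_adjacent_surfaces : Bool) : List Int :=
  let own := (gafLookup? adjacent_sharp_features surface_idx).getD []
  if !own.isEmpty && !always_check_adjacent_surfaces then own
  else
    own ++ ((gafLookup? adjacent_surfaces surface_idx).getD []).flatMap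
      (fun adj => (gafLookup? adjacent_sharp_features adj).getD [])

-- ===== PRECONDITION & SPEC =====
-- Pre_ excludes exactly the inputs where the Python raises KeyError: surface_idx missing
-- from adjacent_sharp_features, or — when the fallback branch runs — surface_idx missing
-- from adjacent_surfaces or some listed adjacent surface missing from adjacent_sharp_features.
def Pre_get_adjacent_features_by_bfs_with_depth1 (surface_idx : Int) (adjacent_sharp_features : List (Int × List Int)) (adjacent_surfaces : List (Int × List Int)) (always_check_adjacent_surfaces : Bool) : Prop :=
  (gafLookup? adjacent_sharp_features surface_idx).isSome = true ∧
  ((always_check_adjacent_surfaces = true ∨ (gafLookup? adjacent_sharp_features surface_idx).getD [] = []) →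
    (gafLookup? adjacent_surfaces surface_idx).isSome = true ∧
    ∀ adj ∈ (gafLookup? adjacent_surfaces surface_idx).getD [],
      (gafLookup? adjacent_sharp_features adj).isSome = true)
instance (surface_idx : Int) (adjacent_sharp_features : List (Int × List Int)) (adjacent_surfaces : List (Int × List Int)) (always_check_adjacent_surfaces : Bool) : Decidable (Pre_get_adjacent_features_by_bfs_with_depth1 surface_idx adjacent_sharp_features adjacent_surfaces always_check_adjacent_surfaces) := by unfold Pre_get_adjacent_features_by_bfs_with_depth1; infer_instance

def pvWitness_get_adjacent_features_by_bfs_with_depth1 : Int × (List (Int × List Int)) × (List (Int × List Int)) × Bool :=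
  (0, [(0, []), (1, [7, 8])], [(0, [1, 1])], false)

def Spec_get_adjacent_features_by_bfs_with_depth1 (surface_idx : Int) (adjacent_sharp_features : List (Int × List Int)) (adjacent_surfaces : List (Int × List Int)) (always_check_adjacent_surfaces : Bool) (out : List Int) : Prop := out = get_adjacent_features_by_bfs_with_depth1_alt surface_idx adjacent_sharp_features adjacent_surfaces always_check_adjacent_surfaces
instance (surface_idx : Int) (adjacent_sharp_features : List (Int × List Int)) (adjacent_surfaces : List (Int × List Int)) (always_check_adjacent_surfaces : Bool) (out : List Int) : Decidable (Spec_get_adjacent_features_by_bfs_with_depth1 surface_idx adjacent_sharp_features adjacent_surfaces always_check_adjacent_surfaces out) := by unfold Spec_get_adjacent_features_by_bfs_with_depth1; infer_instance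

-- ===== CLAIM (what is proved, stated in full; the proofs are below) =====
def Claim_equal_get_adjacent_features_by_bfs_with_depth1 : Prop := ∀ (surface_idx : Int) (adjacent_sharp_features : List (Int × List Int)) (adjacent_surfaces : List (Int × List Int)) (always_check_adjacent_surfaces : Bool), Dom_get_adjacent_features_by_bfs_with_depth1 surface_idx adjacent_sharp_features adjacent_surfaces always_check_adjacent_surfaces → Pre_get_adjacent_features_by_bfs_with_depth1 surface_idx adjacent_sharp_features adjacent_surfaces always_check_adjacent_surfaces → Spec_get_adjacent_features_by_bfs_with_depth1 surface_idx adjacent_sharp_features adjacent_surfaces always_check_adjacent_surfaces (get_adjacent_features_by_bfs_with_depth1 surface_idx adjacent_sharp_features adjacent_surfaces always_check_adjacent_surfaces)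

-- ===== LEMMAS AND PROOFS =====
-- A's inner recursive call on the singleton dict just returns that dict's value.
theorem gafInner_singleton (adj : Int) (v : List Int) : gafInner adj [(adj, v)] = v := by
  simp [gafInner, gafLookup?]

-- ===== VERDICT (by name: the statement is the Claim_ definition above) =====
theorem get_adjacent_features_by_bfs_with_depth1_spec : Claim_equal_get_adjacent_features_by_bfs_with_depth1 := by
  intro si asf asurf al _ _
  unfold Spec_get_adjacent_features_by_bfs_with_depth1
  unfold get_adjacent_features_by_bfs_with_depth1 get_adjacent_features_by_bfs_with_depth1_alt
  simp only [gafInner_singleton, PySem.List.foldl_append_eq_flatMap]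
  rcases al with _ | _ <;>
    rcases h : ((gafLookup? asf si).getD []) with _ | ⟨x, xs⟩ <;>
      simp_all
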